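-- pv_equiv track=rewrite | github.com/jeffbrianho/python_110 | py119_practice_problems/problem3.py | to_weird_case
-- ===== SOURCE A (Python) =====
-- def to_weird_case(sentence):
--
--     def modify_word(word):
--         new_word = ''
--         for indx, char in enumerate(word):
--             if indx % 2 == 0:
--                 new_word += char.lower()
--             else:
--                 new_word += char.upper()
--         return new_word
--
--     list_of_words = sentence.split()
--
--     counter = 1
--     final_string_list = []
--     for word in list_of_words:
--
--         if counter != 3:
--             final_string_list.append(word)
--             counter += 1
--         else:
--             final_string_list.append(modify_word(word))
--             counter = 1
--
--     return ' '.join(final_string_list)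
-- ===== SOURCE B (Python) =====
-- def to_weird_case(sentence):
--
--     def modify_word(word):
--         return ''.join(c.lower() if i % 2 == 0 else c.upper()
--                        for i, c in enumerate(word))
--
--     def chunk3(ws):
--         if len(ws) < 3:
--             return ws
--         a, b, c, *rest = ws
--         return [a, b, modify_word(c)] + chunk3(rest)
--
--     return ' '.join(chunk3(sentence.split()))
-- ===== Notes on version B (the rewrite author's own statement) =====
-- stated objective: simpler
-- what changed: Replaces A's resetting word counter and accumulator loop with a recursion that peels three words at a time (modifying the third), and builds the modified word by joining an enumerate comprehension instead of string concatenation.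
import Mathlib
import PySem

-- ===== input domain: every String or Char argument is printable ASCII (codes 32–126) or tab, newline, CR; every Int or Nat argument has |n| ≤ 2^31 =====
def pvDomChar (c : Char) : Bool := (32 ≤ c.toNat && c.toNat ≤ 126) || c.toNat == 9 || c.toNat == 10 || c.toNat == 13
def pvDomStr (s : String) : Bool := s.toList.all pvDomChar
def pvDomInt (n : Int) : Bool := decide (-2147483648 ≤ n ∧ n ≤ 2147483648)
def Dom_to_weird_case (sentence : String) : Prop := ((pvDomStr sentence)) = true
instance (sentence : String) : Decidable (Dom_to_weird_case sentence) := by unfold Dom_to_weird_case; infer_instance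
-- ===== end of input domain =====

-- B replaces A's resetting word counter with a direct chunks-of-three recursion and
-- builds the modified word by join-over-enumerate instead of string accumulation (objective: simpler).

-- ===== PORT A =====
-- modify_word: enumerate over the word, accumulating the new word char by char
-- (the String accumulator is kept as a List Char and wrapped with String.ofList at the end; exact).
def pvModifyA (word : String) : String :=
  String.ofList
    ((PySem.List.enumerate word.toList 0).foldl
      (fun acc p =>
        acc ++ [if p.1 % 2 == 0 then PySem.Chars.lowerChar p.2 else PySem.Chars.upperChar p.2])
      [])

-- the for-loop over list_of_words with its counter and final_string_list accumulator
def pvLoopA (ws : List String) (counter : Int) (acc : List String) : List String :=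
  match ws with
  | [] => acc
  | w :: rest =>
    if counter != 3 then pvLoopA rest (counter + 1) (acc ++ [w])
    else pvLoopA rest 1 (acc ++ [pvModifyA w])

def to_weird_case (sentence : String) : String :=
  PySem.Str.join " " (pvLoopA (PySem.Str.split₀ sentence) 1 [])

-- ===== PORT B =====
-- modify_word: ''.join of the per-char comprehension
def pvModifyB (word : String) : String :=
  PySem.Str.join ""
    ((PySem.List.enumerate word.toList 0).map
      (fun p =>
        if p.1 % 2 == 0 then String.ofList [PySem.Chars.lowerChar p.2]
        else String.ofList [PySem.Chars.upperChar p.2]))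

-- chunk3: peel off three words at a time, modifying the third
def pvChunk3 (ws : List String) : List String :=
  match ws with
  | a :: b :: c :: rest => a :: b :: pvModifyB c :: pvChunk3 rest
  | ws => ws

def to_weird_case_alt (sentence : String) : String :=
  PySem.Str.join " " (pvChunk3 (PySem.Str.split₀ sentence))

-- ===== PRECONDITION & SPEC =====
def Spec_to_weird_case (sentence : String) (out : String) : Prop := out = to_weird_case_alt sentence
instance (sentence : String) (out : String) : Decidable (Spec_to_weird_case sentence out) := by unfold Spec_to_weird_case; infer_instance

-- ===== CLAIM (what is proved, stated in full; the proofs are below) =====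
def Claim_equal_to_weird_case : Prop := ∀ (sentence : String), Dom_to_weird_case sentence → Spec_to_weird_case sentence (to_weird_case sentence)

-- ===== LEMMAS AND PROOFS =====

theorem pv_foldl_app {α β : Type} (f : α → β) :
    ∀ (l : List α) (init : List β),
      l.foldl (fun acc p => acc ++ [f p]) init = init ++ l.map f := by
  intro l
  induction l with
  | nil => simp
  | cons x xs ih => intro init; simp [List.foldl, ih]

theorem pv_join_singletons (cs : List Char) :
    PySem.Str.join "" (cs.map (fun c => String.ofList [c])) = String.ofList cs := by
  apply String.toList_inj.mp
  rw [PySem.Str.toList_join, List.map_map,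
    show (String.toList ∘ fun c => String.ofList [c]) = (fun c : Char => [c]) from
      funext fun c => by simp]
  simp [PySem.Chars.join_nil_singletons cs]

theorem pvModify_eq (w : String) : pvModifyA w = pvModifyB w := by
  unfold pvModifyA pvModifyB
  rw [pv_foldl_app (fun p : Int × Char =>
        if p.1 % 2 == 0 then PySem.Chars.lowerChar p.2 else PySem.Chars.upperChar p.2)]
  rw [show (PySem.List.enumerate w.toList 0).map
        (fun p => if p.1 % 2 == 0 then String.ofList [PySem.Chars.lowerChar p.2]
                  else String.ofList [PySem.Chars.upperChar p.2])
      = ((PySem.List.enumerate w.toList 0).map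
          (fun p => if p.1 % 2 == 0 then PySem.Chars.lowerChar p.2
                    else PySem.Chars.upperChar p.2)).map (fun c => String.ofList [c]) from by
    rw [List.map_map]
    exact List.map_congr_left fun p _ => by dsimp only [Function.comp]; split <;> rfl]
  rw [pv_join_singletons]
  simp

theorem pvLoop_eq (ws acc : List String) :
    pvLoopA ws 1 acc = acc ++ pvChunk3 ws := by
  induction ws using pvChunk3.induct generalizing acc with
  | case1 a b c rest ih =>
    rw [pvLoopA, pvLoopA, pvLoopA]
    norm_num
    rw [ih, pvChunk3, pvModify_eq]
    simp
  | case2 ws h =>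
    match ws with
    | [] => simp [pvLoopA, pvChunk3]
    | [a] => simp [pvLoopA, pvChunk3]
    | [a, b] => simp [pvLoopA, pvChunk3]
    | a :: b :: c :: rest => exact (h a b c rest rfl).elim

-- ===== VERDICT (by name: the statement is the Claim_ definition above) =====
theorem to_weird_case_spec : Claim_equal_to_weird_case := by
  intro s _
  unfold Spec_to_weird_case to_weird_case to_weird_case_alt
  rw [pvLoop_eq]; simp
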